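-- pv_equiv track=rewrite | github.com/asayda01/Codility | Lessons/Lesson - 6 - Sorting/Max_Product_Of_Three.py | solution
-- ===== SOURCE A (Python) =====
-- def solution(nums):
--     product = 1
--     negative_sum = 0
--     has_positive = False
--
--     for num in nums:
--         if num > 0:
--             product *= num
--             has_positive = True
--         elif num < 0:
--             negative_sum += abs(num)
--
--     if not has_positive:
--         return negative_sum  # If there are no positive numbers
--
--     return product + negative_sum  # Return the combined result
-- ===== SOURCE B (Python) =====
-- def solution(nums):
--     # Sort so the sign classes become contiguous: negatives, then zeros, then positives.
--     s = sorted(nums)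
--     neg = 0
--     while s and s[0] < 0:
--         neg -= s[0]
--         s = s[1:]
--     while s and s[0] == 0:
--         s = s[1:]
--     if not s:
--         return neg
--     prod = 1
--     for x in s:
--         prod *= x
--     return prod + neg
-- ===== Notes on version B (the rewrite author's own statement) =====
-- stated objective: alternative
-- what changed: Instead of A's single branching loop over three accumulators, B sorts the list so negatives/zeros/positives are contiguous, then consumes the negative prefix into a sum, skips the zero block, and multiplies the remaining suffix; it trades A's O(n) one-pass scan for an O(n log n) sort that removes all sign branching from the reductions.
import Mathlib
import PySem

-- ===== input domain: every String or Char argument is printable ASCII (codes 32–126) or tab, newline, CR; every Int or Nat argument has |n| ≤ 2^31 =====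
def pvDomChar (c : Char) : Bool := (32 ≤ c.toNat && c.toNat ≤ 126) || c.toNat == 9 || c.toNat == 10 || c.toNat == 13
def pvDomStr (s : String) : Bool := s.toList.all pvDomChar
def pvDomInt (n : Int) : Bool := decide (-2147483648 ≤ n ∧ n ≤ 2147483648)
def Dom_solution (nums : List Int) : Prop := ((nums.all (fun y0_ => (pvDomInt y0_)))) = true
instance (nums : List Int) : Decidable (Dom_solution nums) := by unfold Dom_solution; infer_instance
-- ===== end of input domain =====

-- B is an alternative: it sorts the list so the sign classes are contiguous, then consumes the
-- negative prefix, skips the zero block and multiplies the positive suffix (O(n log n) vs A's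
-- single O(n) branching accumulator loop).

-- ===== PORT A =====
-- single pass over nums with accumulators (product, negative_sum, has_positive)
def solution (nums : List Int) : Int :=
  let st := nums.foldl (fun (s : Int × Int × Bool) num =>
      if num > 0 then (s.1 * num, s.2.1, true)
      else if num < 0 then (s.1, s.2.1 + |num|, s.2.2)
      else s) (1, 0, false)
  if !st.2.2 then st.2.1 else st.1 + st.2.1

-- ===== PORT B =====
-- first while loop of Source B: consume the leading negatives into neg (neg -= s[0]; s = s[1:])
def pvDropNegSum : List Int → Int → Int × List Int
  | [], neg => (neg, [])
  | x :: xs, neg => if x < 0 then pvDropNegSum xs (neg - x) else (neg, x :: xs)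

-- second while loop of Source B: skip the leading zeros
def pvDropZeros : List Int → List Int
  | [] => []
  | x :: xs => if x = 0 then pvDropZeros xs else x :: xs

def solution_alt (nums : List Int) : Int :=
  let s := PySem.List.sorted nums (fun x => x) false
  let p := pvDropNegSum s 0
  let s2 := pvDropZeros p.2
  if s2 = [] then p.1
  else s2.foldl (· * ·) 1 + p.1

-- ===== PRECONDITION & SPEC =====
def Spec_solution (nums : List Int) (out : Int) : Prop := out = solution_alt nums
instance (nums : List Int) (out : Int) : Decidable (Spec_solution nums out) := by unfold Spec_solution; infer_instance

-- ===== CLAIM (what is proved, stated in full; the proofs are below) =====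
def Claim_equal_solution : Prop := ∀ (nums : List Int), Dom_solution nums → Spec_solution nums (solution nums)

-- ===== LEMMAS AND PROOFS =====

-- A's fold equals the partitioned reductions, for any starting accumulator.
theorem pv_fold_char (nums : List Int) : ∀ (p s : Int) (h : Bool),
    nums.foldl (fun (st : Int × Int × Bool) num =>
      if num > 0 then (st.1 * num, st.2.1, true)
      else if num < 0 then (st.1, st.2.1 + |num|, st.2.2)
      else st) (p, s, h)
    = ((nums.filter (fun n => decide (0 < n))).foldl (· * ·) p,
       s + ((nums.filter (fun n => decide (n < 0))).map (fun n => -n)).sum,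
       h || !decide (nums.filter (fun n => decide (0 < n)) = [])) := by
  induction nums with
  | nil => intro p s h; simp
  | cons x xs ih =>
    intro p s h
    by_cases hx : 0 < x
    · have hx2 : ¬ x < 0 := by omega
      simp [List.foldl, hx, hx2, List.filter, ih]
    · by_cases hx2 : x < 0
      · simp [List.foldl, hx, hx2, List.filter, ih, abs_of_neg hx2]
        omega
      · have hx0 : x = 0 := by omega
        simp [List.foldl, List.filter, ih, hx0]

-- On a ≤-sorted list the negative-prefix loop consumes exactly the negatives and leaves the ≥0 tail.
theorem pv_dropNegSum_char (s : List Int) (hs : s.Pairwise (· ≤ ·)) : ∀ (a : Int),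
    pvDropNegSum s a = (a + ((s.filter (fun n => decide (n < 0))).map (fun n => -n)).sum,
                        s.filter (fun n => decide (0 ≤ n))) := by
  induction s with
  | nil => intro a; simp [pvDropNegSum]
  | cons x xs ih =>
    intro a
    rcases List.pairwise_cons.mp hs with ⟨hx, hxs⟩
    by_cases h : x < 0
    · have h2 : ¬ 0 ≤ x := by omega
      simp [pvDropNegSum, h, h2, List.filter, ih hxs]
      ring
    · -- x ≥ 0, so every later element is ≥ 0 as well: nothing to consume
      have hall : ∀ y ∈ x :: xs, (0:Int) ≤ y := by
        intro y hy
        rcases List.mem_cons.mp hy with rfl | hy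
        · omega
        · exact le_trans (by omega) (hx y hy)
      have h1 : (x :: xs).filter (fun n => decide (n < 0)) = [] := by
        rw [List.filter_eq_nil_iff]
        intro y hy; simpa using not_lt.mpr (hall y hy)
      have h2 : (x :: xs).filter (fun n => decide (0 ≤ n)) = x :: xs := by
        rw [List.filter_eq_self]
        intro y hy; simpa using hall y hy
      simp [pvDropNegSum, h, h1, h2]

-- On a ≤-sorted list of nonnegatives the zero-skipping loop leaves exactly the positives.
theorem pv_dropZeros_char (s : List Int) (hs : s.Pairwise (· ≤ ·))
    (hnn : ∀ y ∈ s, (0:Int) ≤ y) :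
    pvDropZeros s = s.filter (fun n => decide (0 < n)) := by
  induction s with
  | nil => simp [pvDropZeros]
  | cons x xs ih =>
    rcases List.pairwise_cons.mp hs with ⟨hx, hxs⟩
    by_cases h : x = 0
    · subst h
      simp [pvDropZeros, List.filter, ih hxs (fun y hy => hnn y (List.mem_cons_of_mem _ hy))]
    · have hpos : (0:Int) < x := lt_of_le_of_ne (hnn x (List.mem_cons_self)) (Ne.symm h)
      have : (x :: xs).filter (fun n => decide (0 < n)) = x :: xs := by
        rw [List.filter_eq_self]
        intro y hy
        rcases List.mem_cons.mp hy with rfl | hy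
        · simpa using hpos
        · simpa using lt_of_lt_of_le hpos (hx y hy)
      simp [pvDropZeros, h, this]

-- filtering ≥0 then >0 collapses to filtering >0
theorem pv_filter_filter (s : List Int) :
    (s.filter (fun n => decide (0 ≤ n))).filter (fun n => decide (0 < n))
      = s.filter (fun n => decide (0 < n)) := by
  rw [List.filter_filter]
  apply List.filter_congr
  intro y _
  by_cases h : (0:Int) < y <;> simp [h]
  omega

-- ===== VERDICT (by name: the statement is the Claim_ definition above) =====
theorem solution_spec : Claim_equal_solution := by
  intro nums _
  unfold Spec_solution solution solution_alt
  have hperm : (PySem.List.sorted nums (fun x => x) false).Perm nums :=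
    PySem.List.sorted_perm nums (fun x => x) false
  have hsorted : (PySem.List.sorted nums (fun x => x) false).Pairwise (· ≤ ·) := by
    simpa using PySem.List.sorted_pairwise nums (fun x => x)
  set s := PySem.List.sorted nums (fun x => x) false with hs
  have hnn : ∀ y ∈ s.filter (fun n => decide (0 ≤ n)), (0:Int) ≤ y := by
    intro y hy
    have := List.of_mem_filter hy
    simpa using this
  simp only [pv_fold_char, Bool.false_or,
    pv_dropNegSum_char s hsorted 0,
    pv_dropZeros_char _ (hsorted.filter _) hnn,
    pv_filter_filter]
  -- transport the reductions across the permutation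
  have hpf : (s.filter (fun n => decide (0 < n))).Perm
      (nums.filter (fun n => decide (0 < n))) := hperm.filter _
  have hnf : (s.filter (fun n => decide (n < 0))).Perm
      (nums.filter (fun n => decide (n < 0))) := hperm.filter _
  have hprod : (s.filter (fun n => decide (0 < n))).foldl (· * ·) 1
      = (nums.filter (fun n => decide (0 < n))).foldl (· * ·) 1 := by
    rw [← List.prod_eq_foldl, ← List.prod_eq_foldl]
    exact hpf.prod_eq
  have hsum : ((s.filter (fun n => decide (n < 0))).map (fun n => -n)).sum
      = ((nums.filter (fun n => decide (n < 0))).map (fun n => -n)).sum :=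
    (hnf.map _).sum_eq
  have hnil : (s.filter (fun n => decide (0 < n)) = [])
      = (nums.filter (fun n => decide (0 < n)) = []) := by
    simp [← List.length_eq_zero_iff, hpf.length_eq]
  rw [hprod, hsum]
  by_cases hp : nums.filter (fun n => decide (0 < n)) = [] <;>
    simp [hp, hnil.symm ▸ hp, zero_add]
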